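-- pv_equiv track=rewrite | github.com/vincentsmid/ZPR | ukoly/komprese.py | split_symbols
-- ===== SOURCE A (Python) =====
-- def split_symbols(symbols_freq):
--     total = 0
--     for symbol, freq in symbols_freq:
--         total += freq
--
--     running_sum = 0
--     best_diff = float('inf')
--     split_index = 0
--
--     for i in range(len(symbols_freq)):
--         running_sum += symbols_freq[i][1]
--         diff = abs(2 * running_sum - total)
--         if diff < best_diff:
--             best_diff = diff
--             split_index = i + 1
--
--     return symbols_freq[:split_index], symbols_freq[split_index:]
-- ===== SOURCE B (Python) =====
-- def _to_list(cell):
--     out = []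
--     while cell is not None:
--         out.append(cell[0])
--         cell = cell[1]
--     return out
--
--
-- def split_symbols(symbols_freq):
--     # Right-to-left scan building both halves directly as shared persistent
--     # cons cells; no indices, no slicing.  A split just after the current item
--     # has diff |total - 2*suffix| where suffix is the sum of the items already
--     # seen (those to its right); taking a new best on '<=' keeps the leftmost
--     # minimum.  Cell sharing makes every step O(1).
--     total = sum(f for _, f in symbols_freq)
--     best = None          # (best_diff, left_cells, right_cells)
--     tail = None          # cons list of the items to the right of the current one
--     suffix = 0           # sum of their frequencies
--     for item in reversed(symbols_freq):
--         d = abs(total - 2 * suffix)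
--         if best is None or d <= best[0]:
--             best = (d, (item, None), tail)
--         else:
--             best = (best[0], (item, best[1]), best[2])
--         tail = (item, tail)
--         suffix += item[1]
--     if best is None:
--         return [], []
--     return _to_list(best[1]), _to_list(best[2])
-- ===== Notes on version B (the rewrite author's own statement) =====
-- stated objective: alternative
-- what changed: B scans right-to-left once and builds the two output halves directly as shared persistent cons cells (no index, no argmin-by-index, no slicing), where A scans left-to-right tracking a best split index and slices at the end.
import Mathlib
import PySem

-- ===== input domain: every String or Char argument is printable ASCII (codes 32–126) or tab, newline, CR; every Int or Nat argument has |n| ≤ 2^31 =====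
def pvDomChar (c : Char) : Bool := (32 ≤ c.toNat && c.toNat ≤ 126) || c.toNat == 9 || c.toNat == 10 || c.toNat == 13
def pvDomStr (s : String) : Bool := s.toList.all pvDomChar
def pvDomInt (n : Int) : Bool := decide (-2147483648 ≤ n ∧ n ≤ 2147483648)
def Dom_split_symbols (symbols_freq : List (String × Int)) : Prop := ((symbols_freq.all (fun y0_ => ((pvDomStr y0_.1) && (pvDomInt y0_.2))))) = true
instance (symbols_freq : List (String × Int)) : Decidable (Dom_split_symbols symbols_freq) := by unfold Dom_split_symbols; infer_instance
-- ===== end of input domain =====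

-- B replaces A's left-to-right best-index scan + slicing by a single right-to-left scan
-- that constructs both output halves directly as shared cons cells (objective: alternative).

-- ===== PORT A =====
-- one iteration of A's loop body: running_sum update, diff, strict-< best update
-- (best_diff = none plays float('inf'): the comparison 'diff < inf' is always true)
def stepA (l : List (String × Int)) (total : Int) (s : Int × Option Int × Int) (i : Int) :
    Int × Option Int × Int :=
  let rs := s.1 + (PySem.List.pyGetD l i ("", 0)).2   -- symbols_freq[i][1]; i always in range here
  let diff := |2 * rs - total|
  match s.2.1 with
  | none => (rs, some diff, i + 1)
  | some b => if diff < b then (rs, some diff, i + 1) else (rs, s.2.1, s.2.2)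

def split_symbols (symbols_freq : List (String × Int)) :
    (List (String × Int)) × (List (String × Int)) :=
  let total := symbols_freq.foldl (fun t p => t + p.2) 0
  let st := (PySem.List.pyRange 0 (symbols_freq.length : Int) 1).foldl
      (stepA symbols_freq total) (0, none, 0)
  (PySem.List.slice symbols_freq none (some st.2.2),
   PySem.List.slice symbols_freq (some st.2.2) none)

-- ===== PORT B =====
-- Python's cons cells (item, rest) / None are exactly Lean lists; _to_list's while
-- loop appends each head to 'out', ported literally as pyToListGo
def pyToListGo (acc : List (String × Int)) : List (String × Int) → List (String × Int)
  | [] => acc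
  | x :: t => pyToListGo (acc ++ [x]) t

def pyToList (cell : List (String × Int)) : List (String × Int) := pyToListGo [] cell

-- one iteration of B's loop: state = (best?, tail, suffix); best = (diff, left cells, right cells)
def stepB (total : Int)
    (st : Option (Int × List (String × Int) × List (String × Int)) × List (String × Int) × Int)
    (item : String × Int) :
    Option (Int × List (String × Int) × List (String × Int)) × List (String × Int) × Int :=
  let d := |total - 2 * st.2.2|
  let best :=
    match st.1 with
    | none => some (d, [item], st.2.1)
    | some (bd, bl, br) => if d ≤ bd then some (d, [item], st.2.1) else some (bd, item :: bl, br)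
  (best, item :: st.2.1, st.2.2 + item.2)

def split_symbols_alt (symbols_freq : List (String × Int)) :
    (List (String × Int)) × (List (String × Int)) :=
  let total := symbols_freq.foldl (fun t p => t + p.2) 0     -- sum(f for _, f in symbols_freq)
  let st := symbols_freq.reverse.foldl (stepB total) (none, [], 0)   -- for item in reversed(...)
  match st.1 with
  | none => ([], [])
  | some (_, bl, br) => (pyToList bl, pyToList br)

-- ===== PRECONDITION & SPEC =====
def Spec_split_symbols (symbols_freq : List (String × Int)) (out : (List (String × Int)) × (List (String × Int))) : Prop := out = split_symbols_alt symbols_freq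
instance (symbols_freq : List (String × Int)) (out : (List (String × Int)) × (List (String × Int))) : Decidable (Spec_split_symbols symbols_freq out) := by unfold Spec_split_symbols; infer_instance

-- ===== CLAIM (what is proved, stated in full; the proofs are below) =====
def Claim_equal_split_symbols : Prop := ∀ (symbols_freq : List (String × Int)), Dom_split_symbols symbols_freq → Spec_split_symbols symbols_freq (split_symbols symbols_freq)

-- ===== LEMMAS AND PROOFS =====

def sumf (l : List (String × Int)) : Int := (l.map Prod.snd).sum

def psum (l : List (String × Int)) (j : Nat) : Int := sumf (l.take j)

-- A's key: diff of the split after the first j elements, via the prefix sum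
def KeyP (total : Int) (l : List (String × Int)) (j : Nat) : Int := |2 * psum l j - total|

-- B's key: the same split's diff via the suffix sum
def KeyS (total : Int) (r : List (String × Int)) (m : Nat) : Int := |total - 2 * sumf (r.drop m)|

lemma foldl_sum (l : List (String × Int)) :
    ∀ a : Int, l.foldl (fun t p => t + p.2) a = a + sumf l := by
  induction l with
  | nil => intro a; simp [sumf]
  | cons p t ih => intro a; simp [ih, sumf, add_assoc]

lemma pyToList_go (t : List (String × Int)) :
    ∀ acc, pyToListGo acc t = acc ++ t := by
  induction t with
  | nil => intro acc; simp [pyToListGo]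
  | cons x s ih => intro acc; simp [pyToListGo, ih]

lemma pyToList_eq (l : List (String × Int)) : pyToList l = l := by
  simp [pyToList, pyToList_go]

lemma psum_succ (l : List (String × Int)) (j : Nat) (h : j < l.length) :
    psum l (j + 1) = psum l j + (l[j]).2 := by
  unfold psum sumf
  simp only [List.take_add_one, List.getElem?_eq_getElem h, Option.toList_some,
    List.map_append, List.sum_append, List.map_cons, List.map_nil, List.sum_cons,
    List.sum_nil, add_zero]

lemma sum_take_drop (l : List (String × Int)) (m : Nat) :
    psum l m + sumf (l.drop m) = sumf l := by
  have : sumf (l.take m) + sumf (l.drop m) = sumf (l.take m ++ l.drop m) := by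
    simp [sumf]
  simpa [psum, List.take_append_drop] using this

-- the two keys agree when total is the whole sum
lemma keyPS (l : List (String × Int)) (m : Nat) :
    KeyP (sumf l) l m = KeyS (sumf l) l m := by
  have h := sum_take_drop l m
  have heq : sumf l - 2 * sumf (l.drop m) = 2 * psum l m - sumf l := by omega
  unfold KeyP KeyS
  rw [heq]

-- B's loop invariant: after folding a nonempty suffix r, the state carries the leftmost
-- best split of r (key, left cells = take k, right cells = drop k), the tail and its sum
lemma Binv (total : Int) : ∀ r : List (String × Int), r ≠ [] →
    ∃ k : Nat, 1 ≤ k ∧ k ≤ r.length ∧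
      r.foldr (fun x s => stepB total s x) (none, [], 0)
        = (some (KeyS total r k, r.take k, r.drop k), r, sumf r) ∧
      (∀ j, 1 ≤ j → j ≤ r.length → KeyS total r k ≤ KeyS total r j) ∧
      (∀ j, 1 ≤ j → j < k → KeyS total r k < KeyS total r j) := by
  intro r
  induction r with
  | nil => intro h; exact absurd rfl h
  | cons x t ih =>
      intro _
      by_cases ht : t = []
      · subst ht
        refine ⟨1, le_refl 1, by simp, ?_, ?_, ?_⟩
        · simp [stepB, KeyS, sumf]
        · intro j h1 h2
          have : j = 1 := by simpa using le_antisymm h2 h1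
          simp [this]
        · intro j h1 h2; omega
      · obtain ⟨k, hk1, hk2, hfold, hmin, hstrict⟩ := ih ht
        have hKshift : ∀ j : Nat, KeyS total (x :: t) (j + 1) = KeyS total t j := by
          intro j; simp [KeyS]
        have hK1 : KeyS total (x :: t) 1 = |total - 2 * sumf t| := by
          simp [KeyS]
        rw [List.foldr_cons, hfold]
        by_cases hle : |total - 2 * sumf t| ≤ KeyS total t k
        · refine ⟨1, le_refl 1, by simp, ?_, ?_, ?_⟩
          · simp only [stepB, if_pos hle]
            refine congrArg₂ Prod.mk ?_ (by simp [sumf, add_comm])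
            simp [hK1]
          · intro j h1 h2
            rw [hK1]
            cases j with
            | zero => omega
            | succ j' =>
                cases j' with
                | zero => simp [hK1]
                | succ j'' =>
                    rw [hKshift]
                    exact le_trans hle (hmin _ (by omega) (by simpa using h2))
          · intro j h1 h2; omega
        · rw [not_le] at hle
          refine ⟨k + 1, by omega, by simpa using Nat.succ_le_succ hk2, ?_, ?_, ?_⟩
          · simp only [stepB, if_neg (not_le.mpr hle)]
            refine congrArg₂ Prod.mk ?_ (by simp [sumf, add_comm])
            rw [hKshift]
            simp [List.take_succ_cons, List.drop_succ_cons]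
          · intro j h1 h2
            rw [hKshift]
            cases j with
            | zero => omega
            | succ j' =>
                cases j' with
                | zero => rw [hK1]; exact le_of_lt hle
                | succ j'' =>
                    rw [hKshift]
                    exact hmin _ (by omega) (by simpa using h2)
          · intro j h1 h2
            rw [hKshift]
            cases j with
            | zero => omega
            | succ j' =>
                cases j' with
                | zero => rw [hK1]; exact hle
                | succ j'' =>
                    rw [hKshift]
                    exact hstrict _ (by omega) (by omega)

-- A's loop invariant over pyRange 0 j
lemma Ainv (l : List (String × Int)) (total : Int) : ∀ j : Nat, j ≤ l.length →
    (j = 0 ∧ (PySem.List.pyRange 0 (j : Int) 1).foldl (stepA l total) (0, none, 0) = (0, none, 0)) ∨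
    (∃ k : Nat, 1 ≤ k ∧ k ≤ j ∧
      (PySem.List.pyRange 0 (j : Int) 1).foldl (stepA l total) (0, none, 0)
        = (psum l j, some (KeyP total l k), (k : Int)) ∧
      (∀ m, 1 ≤ m → m ≤ j → KeyP total l k ≤ KeyP total l m) ∧
      (∀ m, 1 ≤ m → m < k → KeyP total l k < KeyP total l m)) := by
  intro j
  induction j with
  | zero =>
      intro _
      left
      exact ⟨rfl, by simp [PySem.List.pyRange_one_eq_nil]⟩
  | succ j ih =>
      intro hj1
      have hj : j < l.length := by omega
      have hr : PySem.List.pyRange 0 ((j + 1 : Nat) : Int) 1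
          = PySem.List.pyRange 0 (j : Int) 1 ++ [(j : Int)] := by
        push_cast
        exact PySem.List.pyRange_one_succ_right (by positivity)
      have hget : (PySem.List.pyGetD l (j : Int) ("", 0)).2 = (l[j]).2 := by
        rw [PySem.List.pyGetD_natCast, List.getD_eq_getElem?_getD, List.getElem?_eq_getElem hj]
        rfl
      rw [hr, List.foldl_append, List.foldl_cons, List.foldl_nil]
      rcases ih (by omega) with ⟨hj0, hstate⟩ | ⟨k, hk1, hk2, hstate, hmin, hstrict⟩
      · subst hj0
        right
        have hp1 : psum l 1 = (l[0]).2 := by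
          have := psum_succ l 0 hj
          simpa [psum, sumf] using this
        have hget0 : (PySem.List.pyGetD l 0 ("", 0)).2 = (l[0]).2 := by simpa using hget
        refine ⟨1, le_refl 1, by omega, ?_, ?_, ?_⟩
        · rw [hstate]
          simp [stepA, hget0, KeyP, hp1]
        · intro m h1 h2
          have : m = 1 := by omega
          simp [this]
        · intro m h1 h2; omega
      · right
        rw [hstate]
        simp only [stepA, hget]
        rw [← psum_succ l j hj]
        have hKj1 : |2 * psum l (j + 1) - total| = KeyP total l (j + 1) := rfl
        by_cases hlt : |2 * psum l (j + 1) - total| < KeyP total l k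
        · refine ⟨j + 1, by omega, le_refl _, ?_, ?_, ?_⟩
          · simp only [if_pos hlt]
            refine congrArg₂ Prod.mk rfl (congrArg₂ Prod.mk (by rw [hKj1]) (by push_cast; ring))
          · intro m h1 h2
            rw [← hKj1]
            rcases Nat.lt_or_ge m (j + 1) with hm | hm
            · exact le_of_lt (lt_of_lt_of_le hlt (hmin m h1 (by omega)))
            · have : m = j + 1 := by omega
              simp [this, hKj1]
          · intro m h1 h2
            rw [← hKj1]
            exact lt_of_lt_of_le hlt (hmin m h1 (by omega))
        · refine ⟨k, hk1, by omega, ?_, ?_, ?_⟩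
          · simp only [if_neg hlt]
          · intro m h1 h2
            rcases Nat.lt_or_ge m (j + 1) with hm | hm
            · exact hmin m h1 (by omega)
            · have : m = j + 1 := by omega
              subst this
              rw [← hKj1]
              exact not_lt.mp hlt
          · exact hstrict
  
-- leftmost minima are unique
lemma argmin_unique (K : Nat → Int) (n k1 k2 : Nat)
    (h1a : 1 ≤ k1) (h1b : k1 ≤ n)
    (h1min : ∀ m, 1 ≤ m → m ≤ n → K k1 ≤ K m) (h1str : ∀ m, 1 ≤ m → m < k1 → K k1 < K m)
    (h2a : 1 ≤ k2) (h2b : k2 ≤ n)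
    (h2min : ∀ m, 1 ≤ m → m ≤ n → K k2 ≤ K m) (h2str : ∀ m, 1 ≤ m → m < k2 → K k2 < K m) :
    k1 = k2 := by
  rcases Nat.lt_trichotomy k1 k2 with h | h | h
  · have ha := h2str k1 h1a h
    have hb := h1min k2 h2a h2b
    omega
  · exact h
  · have ha := h1str k2 h2a h
    have hb := h2min k1 h1a h1b
    omega

-- ===== VERDICT (by name: the statement is the Claim_ definition above) =====
theorem split_symbols_spec : Claim_equal_split_symbols := by
  intro l _
  unfold Spec_split_symbols split_symbols split_symbols_alt
  have htot : l.foldl (fun t p => t + p.2) 0 = sumf l := by simpa using foldl_sum l 0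
  by_cases hnil : l = []
  · subst hnil
    simp [PySem.List.pyRange_one_eq_nil, PySem.List.slice_to, PySem.List.slice_from]
  · have hlen : 0 < l.length := List.length_pos_iff.mpr hnil
    -- A side
    rcases Ainv l (sumf l) l.length le_rfl with ⟨h0, _⟩ | ⟨kA, hA1, hA2, hAstate, hAmin, hAstr⟩
    · omega
    -- B side
    obtain ⟨kB, hB1, hB2, hBfold, hBmin, hBstr⟩ := Binv (sumf l) l hnil
    have hBstate : l.reverse.foldl (stepB (sumf l)) (none, [], 0)
        = (some (KeyS (sumf l) l kB, l.take kB, l.drop kB), l, sumf l) := by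
      rw [List.foldl_reverse]
      exact hBfold
    -- the two leftmost argmins coincide
    have hkeq : kA = kB := by
      apply argmin_unique (KeyP (sumf l) l) l.length kA kB hA1 hA2 hAmin hAstr hB1 hB2
      · intro m h1 h2
        rw [keyPS, keyPS]
        exact hBmin m h1 h2
      · intro m h1 h2
        rw [keyPS, keyPS]
        exact hBstr m h1 h2
    simp only [htot, hAstate, hBstate, hkeq, pyToList_eq]
    rw [PySem.List.slice_to_natCast, PySem.List.slice_from_natCast]
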